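-- pv_equiv track=rewrite | github.com/yashhR/competitive | Edyst/printMaxOnDeletion.py | MaxElementFromEnd
-- ===== SOURCE A (Python) =====
-- def MaxElementFromEnd(Arr):
--     bro = sorted(Arr)                             # Create an array that has the original array sorted
--     res = [bro[-1]]                               # append the maximum element of og array before deletion
--     for i in range(len(Arr)-1):                   # pop the last element in the og array as asked
--         l = Arr.pop()                             # delete the same element from the sorted list,
--         bro.remove(l)                             # now, in bro, whatever elements are left in og array are sorted
--         res.append(bro[-1])                       # simply, the last element of bro list is the max of whats left
--     return res
-- ===== SOURCE B (Python) =====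
-- def MaxElementFromEnd(Arr):
--     # One-pass running prefix maximum, reversed at the end (O(n) vs A's O(n^2)).
--     # Note: A mutates Arr in place (pops all but one element); B does not.
--     res = []
--     cur = None
--     for x in Arr:
--         cur = x if cur is None or x > cur else cur
--         res.append(cur)
--     res.reverse()
--     return res
-- ===== Notes on version B (the rewrite author's own statement) =====
-- stated objective: faster
-- what changed: replaces A's sort-then-repeated-pop/remove (a linear remove inside the loop) by a single running prefix-maximum pass reversed at the end; A also mutates Arr in place, B does not
-- crash fix: on the empty list A raises IndexError (bro[-1] on an empty sorted copy) while B returns [] — e.g. on MaxElementFromEnd([]): A raises IndexError, B returns []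
import Mathlib
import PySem

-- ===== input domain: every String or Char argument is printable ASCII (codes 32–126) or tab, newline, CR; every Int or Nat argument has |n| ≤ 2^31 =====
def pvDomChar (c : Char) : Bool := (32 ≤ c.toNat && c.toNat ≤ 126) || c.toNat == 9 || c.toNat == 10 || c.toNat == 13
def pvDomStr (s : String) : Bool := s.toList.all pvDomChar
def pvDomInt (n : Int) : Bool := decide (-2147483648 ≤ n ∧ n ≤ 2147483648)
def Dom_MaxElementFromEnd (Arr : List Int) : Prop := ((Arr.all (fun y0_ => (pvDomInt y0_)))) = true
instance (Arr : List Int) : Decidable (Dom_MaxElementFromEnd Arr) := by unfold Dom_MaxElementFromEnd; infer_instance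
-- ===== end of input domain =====

-- B replaces A's sort + repeated pop/remove loop by a single running prefix-maximum
-- pass reversed at the end (a timing run measured it faster); return value only —
-- A mutates Arr in place (pops all but one element), B does not.


-- ===== PORT A =====
-- literal port of A: bro = sorted(Arr); res = [bro[-1]]; then len(Arr)-1 times pop the
-- last element of Arr, remove it from bro, append bro[-1].  The `none` match arms are
-- the IndexError/ValueError cases, unreachable under Pre_.
def MaxElementFromEnd (Arr : List Int) : List Int :=
  let bro := PySem.List.sorted Arr (fun y => y) false
  let res : List Int := [PySem.List.pyGetD bro (-1) 0]
  let fin :=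
    (PySem.List.pyRange 0 ((Arr.length : Int) - 1) 1).foldl
      (fun (st : List Int × List Int × List Int) _ =>
        match st with
        | (arr, bro, res) =>
          match PySem.List.pop? arr (-1) with
          | none => (arr, bro, res)
          | some (l, arr') =>
            match PySem.List.remove? bro l with
            | none => (arr', bro, res)
            | some bro' => (arr', bro', res ++ [PySem.List.pyGetD bro' (-1) 0]))
      (Arr, bro, res)
  fin.2.2

-- ===== PORT B =====
-- literal port of B: running maximum `cur` (Option Int, None before the first element),
-- append the running maximum for each element, reverse at the end.
def MaxElementFromEnd_alt (Arr : List Int) : List Int :=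
  let s := Arr.foldl
    (fun (st : List Int × Option Int) x =>
      let cur : Int :=
        match st.2 with
        | none => x
        | some c => if x > c then x else c
      (st.1 ++ [cur], some cur))
    ([], none)
  s.1.reverse

-- ===== PRECONDITION & SPEC =====
-- Pre_ excludes only the empty list, on which A raises IndexError (bro[-1] on the empty sorted copy).
def Pre_MaxElementFromEnd (Arr : List Int) : Prop := Arr ≠ []
instance (Arr : List Int) : Decidable (Pre_MaxElementFromEnd Arr) := by unfold Pre_MaxElementFromEnd; infer_instance
def pvWitness_MaxElementFromEnd : List Int := [3, 1, 2]

-- on the empty list A raises IndexError (bro[-1] on the empty sorted copy) while B returns []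
def Raises_MaxElementFromEnd (Arr : List Int) : Prop := Arr = []
instance (Arr : List Int) : Decidable (Raises_MaxElementFromEnd Arr) := by unfold Raises_MaxElementFromEnd; infer_instance
def pvRaiseWitness_MaxElementFromEnd : List Int := []
def pvRaiseWitnessOut_MaxElementFromEnd : List Int := []

def Spec_MaxElementFromEnd (Arr : List Int) (out : List Int) : Prop := out = MaxElementFromEnd_alt Arr
instance (Arr : List Int) (out : List Int) : Decidable (Spec_MaxElementFromEnd Arr out) := by unfold Spec_MaxElementFromEnd; infer_instance

-- ===== CLAIM (what is proved, stated in full; the proofs are below) =====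
def Claim_equal_MaxElementFromEnd : Prop := ∀ (Arr : List Int), Dom_MaxElementFromEnd Arr → Pre_MaxElementFromEnd Arr → Spec_MaxElementFromEnd Arr (MaxElementFromEnd Arr)
def Claim_raises_MaxElementFromEnd : Prop := (∀ (Arr : List Int), Dom_MaxElementFromEnd Arr → Raises_MaxElementFromEnd Arr → ¬ Pre_MaxElementFromEnd Arr) ∧ (Dom_MaxElementFromEnd (pvRaiseWitness_MaxElementFromEnd) ∧ Raises_MaxElementFromEnd (pvRaiseWitness_MaxElementFromEnd) ∧ MaxElementFromEnd_alt (pvRaiseWitness_MaxElementFromEnd) = pvRaiseWitnessOut_MaxElementFromEnd)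

-- ===== LEMMAS AND PROOFS =====

/-- B's `cur` update. -/
def rmax (c x : Int) : Int := if x > c then x else c

/-- Running prefix maxima of `l` continuing from current maximum `c`. -/
def maxesFrom (c : Int) : List Int → List Int
  | [] => []
  | x :: t => rmax c x :: maxesFrom (rmax c x) t

/-- Prefix-maxima list of a whole list: both programs return `(pm Arr).reverse`. -/
def pm : List Int → List Int
  | [] => []
  | x :: t => x :: maxesFrom x t

/-- Maximum of a list (0 on [] — never used there), in B's `rmax`-fold form. -/
def maxOfD : List Int → Int
  | [] => 0
  | x :: t => t.foldl rmax x

theorem rmax_eq_max (c x : Int) : rmax c x = max c x := by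
  unfold rmax; split <;> omega

theorem foldl_rmax_max (t : List Int) (x : Int) : t.foldl rmax x = t.foldl max x := by
  induction t generalizing x with
  | nil => rfl
  | cons y t ih => simp [List.foldl, ih, rmax_eq_max]

theorem maxesFrom_append (c : Int) (t : List Int) (l : Int) :
    maxesFrom c (t ++ [l]) = maxesFrom c t ++ [rmax (t.foldl rmax c) l] := by
  induction t generalizing c with
  | nil => rfl
  | cons y t ih => simp [maxesFrom, List.foldl, ih]

theorem pm_append (ys : List Int) (l : Int) :
    pm (ys ++ [l]) = pm ys ++ [maxOfD (ys ++ [l])] := by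
  cases ys with
  | nil => rfl
  | cons x t => simp [pm, maxOfD, maxesFrom_append, List.foldl_append]

theorem pm_split (xs : List Int) (h : xs ≠ []) :
    pm xs = pm xs.dropLast ++ [maxOfD xs] := by
  obtain ⟨ys, l, rfl⟩ := List.eq_nil_or_concat xs |>.resolve_left h
  rw [List.concat_eq_append, pm_append, List.dropLast_concat]

/-- A's `bro[-1]`: the last element of the sorted copy is the maximum. -/
theorem last_sorted (arr : List Int) (h : arr ≠ []) :
    PySem.List.pyGetD (PySem.List.sorted arr (fun y => y) false) (-1) 0 = maxOfD arr := by
  obtain ⟨x, t, rfl⟩ := List.exists_cons_of_ne_nil h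
  have hm : maxOfD (x :: t) = t.foldl max x := foldl_rmax_max t x
  have hne : PySem.List.sorted (x :: t) (fun y => y) false ≠ [] := by
    rw [ne_eq, PySem.List.sorted_eq_nil_iff]; simp
  rw [PySem.List.pyGetD_neg_one _ 0 hne, List.getLast_eq_getElem, hm]
  have hmem : (PySem.List.sorted (x :: t) (fun y => y) false)[(PySem.List.sorted (x :: t) (fun y => y) false).length - 1] ∈ x :: t := by
    rw [← PySem.List.mem_sorted (key := fun y => y) (rev := false)]
    exact List.getElem_mem _
  have hub := PySem.List.le_foldl_max t x
  have hle : (PySem.List.sorted (x :: t) (fun y => y) false)[(PySem.List.sorted (x :: t) (fun y => y) false).length - 1] ≤ t.foldl max x := by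
    rcases List.mem_cons.mp hmem with hh | hh
    · rw [hh]; exact hub.1
    · exact hub.2 _ hh
  have hFmem : t.foldl max x ∈ PySem.List.sorted (x :: t) (fun y => y) false := by
    rw [PySem.List.mem_sorted]
    rcases PySem.List.foldl_max_mem t x with hh | hh
    · rw [hh]; exact List.mem_cons_self
    · exact List.mem_cons_of_mem _ hh
  obtain ⟨p, hp, hpe⟩ := List.mem_iff_getElem.mp hFmem
  have hge := PySem.List.sorted_id_getElem_mono (x :: t) (p := p)
    (q := (PySem.List.sorted (x :: t) (fun y => y) false).length - 1) (by omega) (by omega)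
  rw [hpe] at hge
  omega

/-- Removing the popped element from the sorted copy leaves the sorted rest. -/
theorem remove_sorted (xs : List Int) (l : Int) :
    PySem.List.remove? (PySem.List.sorted (xs ++ [l]) (fun y => y) false) l
      = some (PySem.List.sorted xs (fun y => y) false) := by
  have hl : l ∈ PySem.List.sorted (xs ++ [l]) (fun y => y) false := by
    rw [PySem.List.mem_sorted]; simp
  rw [PySem.List.remove?_eq_some_erase _ _ hl]
  have hperm : ((PySem.List.sorted (xs ++ [l]) (fun y => y) false).erase l).Perm xs := by
    have p1 := (PySem.List.sorted_perm (xs ++ [l]) (fun y => y) false).erase l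
    have p3 := (List.perm_append_singleton l xs).erase l
    simpa using p1.trans p3
  have hpw : ((PySem.List.sorted (xs ++ [l]) (fun y => y) false).erase l).Pairwise (fun a b => a ≤ b) :=
    (PySem.List.sorted_pairwise (xs ++ [l]) (fun y => y)).sublist List.erase_sublist
  exact congrArg some (PySem.List.sorted_id_eq_of_perm_of_pairwise _ _ hperm hpw).symm

/-- A foldl whose function ignores the list element is an iterate. -/
theorem foldl_const_iterate {α β : Type} (g : β → β) (l : List α) (init : β) :
    l.foldl (fun s _ => g s) init = g^[l.length] init := by
  induction l generalizing init with
  | nil => rfl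
  | cons x t ih => simp [List.foldl, ih, Function.iterate_succ_apply]

/-- A's loop body as a state function (definitionally A's foldl body). -/
def stepA (st : List Int × List Int × List Int) : List Int × List Int × List Int :=
  match st with
  | (arr, bro, res) =>
    match PySem.List.pop? arr (-1) with
    | none => (arr, bro, res)
    | some (l, arr') =>
      match PySem.List.remove? bro l with
      | none => (arr', bro, res)
      | some bro' => (arr', bro', res ++ [PySem.List.pyGetD bro' (-1) 0])

theorem stepA_eq (xs : List Int) (l : Int) (res : List Int) (hxs : xs ≠ []) :
    stepA (xs ++ [l], PySem.List.sorted (xs ++ [l]) (fun y => y) false, res)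
      = (xs, PySem.List.sorted xs (fun y => y) false, res ++ [maxOfD xs]) := by
  simp [stepA, PySem.List.pop?_last, remove_sorted, last_sorted xs hxs]

/-- A's loop, run `arr.length - 1` times from the sorted state. -/
theorem loopA (arr : List Int) (h : arr ≠ []) (res : List Int) :
    (stepA^[arr.length - 1] (arr, PySem.List.sorted arr (fun y => y) false, res)).2.2
      = res ++ (pm arr.dropLast).reverse := by
  induction arr using List.reverseRecOn generalizing res with
  | nil => exact absurd rfl h
  | append_singleton xs l ih =>
    cases hxs : xs with
    | nil => simp [pm]
    | cons a t =>
      rw [← hxs]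
      have hxs' : xs ≠ [] := by rw [hxs]; simp
      have hlen : (xs ++ [l]).length - 1 = (xs.length - 1) + 1 := by
        have := List.length_pos_iff.mpr hxs'
        simp; omega
      rw [hlen, Function.iterate_succ_apply, stepA_eq xs l res hxs',
        ih hxs' (res ++ [maxOfD xs]), List.dropLast_concat, pm_split xs hxs']
      simp

/-- A computes the reversed prefix-maxima list. -/
theorem A_eq_pm (arr : List Int) (h : arr ≠ []) :
    MaxElementFromEnd arr = (pm arr).reverse := by
  change (List.foldl (fun (st : List Int × List Int × List Int) (_ : Int) => stepA st)
      (arr, PySem.List.sorted arr (fun y => y) false,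
        [PySem.List.pyGetD (PySem.List.sorted arr (fun y => y) false) (-1) 0])
      (PySem.List.pyRange 0 ((arr.length : Int) - 1) 1)).2.2 = (pm arr).reverse
  have hn : (PySem.List.pyRange 0 ((arr.length : Int) - 1) 1).length = arr.length - 1 := by
    rw [PySem.List.length_pyRange_one]; omega
  rw [foldl_const_iterate stepA, hn, last_sorted arr h, loopA arr h]
  conv_rhs => rw [pm_split arr h]
  simp

/-- B's loop body as a state function (definitionally B's foldl body). -/
def stepB (st : List Int × Option Int) (x : Int) : List Int × Option Int :=
  let cur : Int :=
    match st.2 with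
    | none => x
    | some c => if x > c then x else c
  (st.1 ++ [cur], some cur)

/-- B's loop invariant, from the first element on. -/
theorem loopB (l : List Int) (acc : List Int) (c : Int) :
    l.foldl stepB (acc, some c) = (acc ++ maxesFrom c l, some (l.foldl rmax c)) := by
  induction l generalizing acc c with
  | nil => simp [maxesFrom]
  | cons x t ih => simp [List.foldl, stepB, maxesFrom, ih, rmax]

/-- B computes the reversed prefix-maxima list. -/
theorem B_eq_pm (arr : List Int) :
    MaxElementFromEnd_alt arr = (pm arr).reverse := by
  cases arr with
  | nil => rfl
  | cons x t =>
    change (List.foldl stepB ([], none) (x :: t)).1.reverse = _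
    rw [List.foldl_cons]
    change (List.foldl stepB ([x], some x) t).1.reverse = _
    rw [loopB]
    simp [pm]

-- ===== VERDICT (by name: the statement is the Claim_ definition above) =====
theorem MaxElementFromEnd_spec : Claim_equal_MaxElementFromEnd := by
  intro Arr _ hpre
  unfold Spec_MaxElementFromEnd
  rw [A_eq_pm Arr hpre, B_eq_pm Arr]

theorem MaxElementFromEnd_raises : Claim_raises_MaxElementFromEnd := by
  unfold Claim_raises_MaxElementFromEnd
  exact ⟨fun Arr _ hr hpre => hpre hr, by decide⟩

-- self-check: the raise witness really lies outside Pre_ (uses the raises theorem above)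
theorem pvRaiseWitness_ok : ¬ Pre_MaxElementFromEnd pvRaiseWitness_MaxElementFromEnd :=
  MaxElementFromEnd_raises.1 pvRaiseWitness_MaxElementFromEnd (by decide) (by decide)
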